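-- pv_equiv track=rewrite | github.com/dorianagaesse/nexus_dash | scripts/dependabot_repair_agent.py | pr_has_failure
-- ===== SOURCE A (Python) =====
-- from typing import Any
--
-- REQUIRED_CHECK_NAMES = {
--     "check-name",
--     "Quality Core (lint, test, coverage, build)",
--     "E2E Smoke (Playwright)",
--     "Container Image (build + metadata artifact)",
-- }
--
-- def pr_has_failure(pr: dict[str, Any]) -> bool:
--     latest_checks: dict[str, dict[str, Any]] = {}
--     latest_keys: dict[str, str] = {}
--
--     for check_run in pr.get("statusCheckRollup") or []:
--         name = check_run.get("name") or ""
--         if name not in REQUIRED_CHECK_NAMES: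
--             continue
--
--         sort_key = (
--             check_run.get("completedAt")
--             or check_run.get("startedAt")
--             or check_run.get("detailsUrl")
--             or ""
--         )
--         if name not in latest_keys or sort_key > latest_keys[name]:
--             latest_keys[name] = sort_key
--             latest_checks[name] = check_run
--
--     return any(
--         check_run.get("status") == "COMPLETED"
--         and check_run.get("conclusion") not in {"SUCCESS", "NEUTRAL", "SKIPPED", None, ""}
--         for check_run in latest_checks.values()
--     )
-- ===== SOURCE B (Python) =====
-- REQUIRED_CHECK_NAMES = {
--     "check-name",
--     "Quality Core (lint, test, coverage, build)",
--     "E2E Smoke (Playwright)",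
--     "Container Image (build + metadata artifact)",
-- }
--
--
-- def _sort_key(check_run):
--     return (
--         check_run.get("completedAt")
--         or check_run.get("startedAt")
--         or check_run.get("detailsUrl")
--         or ""
--     )
--
--
-- def pr_has_failure(pr) -> bool:
--     rollup = pr.get("statusCheckRollup") or []
--     for name in REQUIRED_CHECK_NAMES:
--         runs = [cr for cr in rollup if (cr.get("name") or "") == name]
--         if not runs:
--             continue
--         latest = max(runs, key=_sort_key)
--         if latest.get("status") == "COMPLETED" and latest.get("conclusion") not in {
--             "SUCCESS",
--             "NEUTRAL",
--             "SKIPPED",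
--             None,
--             "",
--         }:
--             return True
--     return False
-- ===== Notes on version B (the rewrite author's own statement) =====
-- stated objective: alternative
-- what changed: Replaces A's single-pass construction of two parallel latest_keys/latest_checks dicts followed by an any() over the collected values with a per-required-name outer loop that filters the rollup and picks the latest run via max() (first-maximal on ties, matching A's strict '>' replacement), returning True as soon as one selected run failed.
import Mathlib
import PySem

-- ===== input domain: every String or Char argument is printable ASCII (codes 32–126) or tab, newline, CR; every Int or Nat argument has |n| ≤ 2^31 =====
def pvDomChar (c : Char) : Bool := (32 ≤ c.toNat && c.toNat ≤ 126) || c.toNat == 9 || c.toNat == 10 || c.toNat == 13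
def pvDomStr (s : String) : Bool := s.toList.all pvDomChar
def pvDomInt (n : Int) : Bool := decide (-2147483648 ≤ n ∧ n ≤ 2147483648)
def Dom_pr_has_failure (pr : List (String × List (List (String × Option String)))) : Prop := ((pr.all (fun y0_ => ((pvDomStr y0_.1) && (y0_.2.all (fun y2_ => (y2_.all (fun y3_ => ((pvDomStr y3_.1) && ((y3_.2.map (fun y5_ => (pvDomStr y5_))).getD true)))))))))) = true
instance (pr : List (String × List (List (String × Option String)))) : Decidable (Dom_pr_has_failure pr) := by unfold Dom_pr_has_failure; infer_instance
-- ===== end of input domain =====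

-- B changes the decomposition: per-required-name filter + max instead of A's one-pass pair of
-- latest_keys/latest_checks dicts plus a final any(); same cost class, no speed claim.

-- shared module context (REQUIRED_CHECK_NAMES and the small dict-access helpers both versions use)
def pvRequired : List String :=
  ["check-name", "Quality Core (lint, test, coverage, build)",
   "E2E Smoke (Playwright)", "Container Image (build + metadata artifact)"]

-- cr.get(k): missing key and stored None are both Python None → none (exact)
def pvGet (d : List (String × Option String)) (k : String) : Option String :=
  ((PySem.Dict.mk d).get? k).join

-- `x or y` for x an Optional[str]: None and "" are falsy (exact on strings)
def pvOrStr (x : Option String) (y : String) : String :=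
  match x with
  | some s => if s = "" then y else s
  | none => y

-- name = check_run.get("name") or ""
def pvName (cr : List (String × Option String)) : String := pvOrStr (pvGet cr "name") ""

-- sort_key = completedAt or startedAt or detailsUrl or ""
def pvSortKey (cr : List (String × Option String)) : String :=
  pvOrStr (pvGet cr "completedAt") (pvOrStr (pvGet cr "startedAt") (pvOrStr (pvGet cr "detailsUrl") ""))

-- status == "COMPLETED" and conclusion not in {"SUCCESS","NEUTRAL","SKIPPED",None,""}
def pvBad (cr : List (String × Option String)) : Bool :=
  (pvGet cr "status" == some "COMPLETED") &&
  !(pvGet cr "conclusion" == some "SUCCESS" || pvGet cr "conclusion" == some "NEUTRAL" ||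
    pvGet cr "conclusion" == some "SKIPPED" || pvGet cr "conclusion" == none ||
    pvGet cr "conclusion" == some "")

-- ===== PORT A =====
-- the body of A's for-loop over statusCheckRollup, state = (latest_keys, latest_checks)
def pvStepA (st : PySem.Dict String String × PySem.Dict String (List (String × Option String)))
    (cr : List (String × Option String)) :
    PySem.Dict String String × PySem.Dict String (List (String × Option String)) :=
  let name := pvName cr
  if pvRequired.contains name then
    let sk := pvSortKey cr
    -- `name not in latest_keys or sort_key > latest_keys[name]` (short-circuit keeps [] safe)
    if (!(st.1.contains name)) || decide (st.1.getD name "" < sk) then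
      (st.1.insert name sk, st.2.insert name cr)
    else st
  else st

def pr_has_failure (pr : List (String × List (List (String × Option String)))) : Bool :=
  let rollup := ((PySem.Dict.mk pr).get? "statusCheckRollup").getD []   -- pr.get(...) or []
  let st := rollup.foldl pvStepA (PySem.Dict.empty, PySem.Dict.empty)
  st.2.values.any pvBad

-- ===== PORT B =====
-- max(runs, key=_sort_key): Python max keeps the current element on ties → first maximal
def pvLatest (r : List (String × Option String)) (rs : List (List (String × Option String))) :
    List (String × Option String) :=
  rs.foldl (fun best cr => if pvSortKey best < pvSortKey cr then cr else best) r

def pr_has_failure_alt (pr : List (String × List (List (String × Option String)))) : Bool :=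
  let rollup := ((PySem.Dict.mk pr).get? "statusCheckRollup").getD []   -- pr.get(...) or []
  pvRequired.any (fun name =>
    match rollup.filter (fun cr => pvName cr == name) with
    | [] => false                      -- no runs for this name: contribute nothing
    | r :: rs => pvBad (pvLatest r rs))

-- ===== PRECONDITION & SPEC =====
def Spec_pr_has_failure (pr : List (String × List (List (String × Option String)))) (out : Bool) : Prop := out = pr_has_failure_alt pr
instance (pr : List (String × List (List (String × Option String)))) (out : Bool) : Decidable (Spec_pr_has_failure pr out) := by unfold Spec_pr_has_failure; infer_instance

-- ===== CLAIM (what is proved, stated in full; the proofs are below) =====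
def Claim_equal_pr_has_failure : Prop := ∀ (pr : List (String × List (List (String × Option String)))), Dom_pr_has_failure pr → Spec_pr_has_failure pr (pr_has_failure pr)

-- ===== LEMMAS AND PROOFS =====

-- A's latest_checks update, with latest_keys eliminated (latest_keys is determined by pvSortKey)
def pvStep2 (c : PySem.Dict String (List (String × Option String)))
    (cr : List (String × Option String)) : PySem.Dict String (List (String × Option String)) :=
  if pvRequired.contains (pvName cr) then
    match c.get? (pvName cr) with
    | none => c.insert (pvName cr) cr
    | some old => if pvSortKey old < pvSortKey cr then c.insert (pvName cr) cr else c
  else c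

-- first-maximal selection from an optional current best
def pvBestStep (o : Option (List (String × Option String))) (cr : List (String × Option String)) :
    Option (List (String × Option String)) :=
  match o with
  | none => some cr
  | some b => if pvSortKey b < pvSortKey cr then some cr else some b

-- unfolding equations for pvStep2
lemma step2_of_not_req (c : PySem.Dict String (List (String × Option String)))
    (cr : List (String × Option String)) (hreq : ¬ pvRequired.contains (pvName cr) = true) :
    pvStep2 c cr = c := by
  unfold pvStep2; rw [if_neg hreq]

lemma step2_of_none (c : PySem.Dict String (List (String × Option String)))
    (cr : List (String × Option String)) (hreq : pvRequired.contains (pvName cr) = true)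
    (hg : c.get? (pvName cr) = none) : pvStep2 c cr = c.insert (pvName cr) cr := by
  unfold pvStep2; rw [if_pos hreq, hg]

lemma step2_of_lt (c : PySem.Dict String (List (String × Option String)))
    (cr old : List (String × Option String)) (hreq : pvRequired.contains (pvName cr) = true)
    (hg : c.get? (pvName cr) = some old) (hlt : pvSortKey old < pvSortKey cr) :
    pvStep2 c cr = c.insert (pvName cr) cr := by
  unfold pvStep2; rw [if_pos hreq, hg]; dsimp only; rw [if_pos hlt]

lemma step2_of_ge (c : PySem.Dict String (List (String × Option String)))
    (cr old : List (String × Option String)) (hreq : pvRequired.contains (pvName cr) = true)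
    (hg : c.get? (pvName cr) = some old) (hge : ¬ pvSortKey old < pvSortKey cr) :
    pvStep2 c cr = c := by
  unfold pvStep2; rw [if_pos hreq, hg]; dsimp only; rw [if_neg hge]

-- unfolding equations for pvStepA
lemma stepA_of_not_req (k : PySem.Dict String String)
    (c : PySem.Dict String (List (String × Option String)))
    (cr : List (String × Option String)) (hreq : ¬ pvRequired.contains (pvName cr) = true) :
    pvStepA (k, c) cr = (k, c) := by
  unfold pvStepA; dsimp only; rw [if_neg hreq]

lemma stepA_of_insert (k : PySem.Dict String String)
    (c : PySem.Dict String (List (String × Option String)))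
    (cr : List (String × Option String)) (hreq : pvRequired.contains (pvName cr) = true)
    (hcond : (!(k.contains (pvName cr)) || decide (k.getD (pvName cr) "" < pvSortKey cr)) = true) :
    pvStepA (k, c) cr = (k.insert (pvName cr) (pvSortKey cr), c.insert (pvName cr) cr) := by
  unfold pvStepA; dsimp only; rw [if_pos hreq, if_pos hcond]

lemma stepA_of_keep (k : PySem.Dict String String)
    (c : PySem.Dict String (List (String × Option String)))
    (cr : List (String × Option String)) (hreq : pvRequired.contains (pvName cr) = true)
    (hcond : ¬ (!(k.contains (pvName cr)) || decide (k.getD (pvName cr) "" < pvSortKey cr)) = true) :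
    pvStepA (k, c) cr = (k, c) := by
  unfold pvStepA; dsimp only; rw [if_pos hreq, if_neg hcond]

lemma stepA_eq (k : PySem.Dict String String)
    (c : PySem.Dict String (List (String × Option String)))
    (cr : List (String × Option String))
    (hinv : ∀ n, k.get? n = (c.get? n).map pvSortKey) :
    (pvStepA (k, c) cr).2 = pvStep2 c cr ∧
      ∀ n, (pvStepA (k, c) cr).1.get? n = ((pvStep2 c cr).get? n).map pvSortKey := by
  have hinv_ins : ∀ n, (k.insert (pvName cr) (pvSortKey cr)).get? n =
      ((c.insert (pvName cr) cr).get? n).map pvSortKey := by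
    intro n
    rw [PySem.Dict.get?_insert, PySem.Dict.get?_insert]
    by_cases hn : n = pvName cr
    · rw [if_pos hn, if_pos hn]; rfl
    · rw [if_neg hn, if_neg hn, hinv n]
  by_cases hreq : pvRequired.contains (pvName cr) = true
  · cases hg : c.get? (pvName cr) with
    | none =>
      have hcf : k.contains (pvName cr) = false := by
        rw [PySem.Dict.contains_eq_isSome_get?, hinv, hg]; rfl
      have hcond : (!(k.contains (pvName cr)) || decide (k.getD (pvName cr) "" < pvSortKey cr)) = true := by
        rw [hcf]; rfl
      rw [stepA_of_insert k c cr hreq hcond, step2_of_none c cr hreq hg]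
      exact ⟨rfl, hinv_ins⟩
    | some old =>
      have hct : k.contains (pvName cr) = true := by
        rw [PySem.Dict.contains_eq_isSome_get?, hinv, hg]; rfl
      have hgd : k.getD (pvName cr) "" = pvSortKey old := by
        apply PySem.Dict.getD_of_get?_eq_some
        rw [hinv, hg]; rfl
      by_cases hlt : pvSortKey old < pvSortKey cr
      · have hcond : (!(k.contains (pvName cr)) || decide (k.getD (pvName cr) "" < pvSortKey cr)) = true := by
          rw [hct, hgd]; simp [hlt]
        rw [stepA_of_insert k c cr hreq hcond, step2_of_lt c cr old hreq hg hlt]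
        exact ⟨rfl, hinv_ins⟩
      · have hcond : ¬ (!(k.contains (pvName cr)) || decide (k.getD (pvName cr) "" < pvSortKey cr)) = true := by
          rw [hct, hgd]; simp [hlt]
        rw [stepA_of_keep k c cr hreq hcond, step2_of_ge c cr old hreq hg hlt]
        exact ⟨rfl, hinv⟩
  · rw [stepA_of_not_req k c cr hreq, step2_of_not_req c cr hreq]
    exact ⟨rfl, hinv⟩

lemma foldA_snd (l : List (List (String × Option String)))
    (k : PySem.Dict String String) (c : PySem.Dict String (List (String × Option String)))
    (hinv : ∀ n, k.get? n = (c.get? n).map pvSortKey) :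
    (l.foldl pvStepA (k, c)).2 = l.foldl pvStep2 c := by
  induction l generalizing k c with
  | nil => rfl
  | cons cr l ih =>
    obtain ⟨h2, h1⟩ := stepA_eq k c cr hinv
    simp only [List.foldl_cons]
    rw [← h2]
    rw [← h2] at h1
    exact ih (pvStepA (k, c) cr).1 (pvStepA (k, c) cr).2 h1

lemma step2_get?_ne (c : PySem.Dict String (List (String × Option String)))
    (cr : List (String × Option String)) (n : String) (h : ¬ pvName cr = n) :
    (pvStep2 c cr).get? n = c.get? n := by
  have hne : n ≠ pvName cr := fun hh => h hh.symm
  by_cases hreq : pvRequired.contains (pvName cr) = true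
  · cases hg : c.get? (pvName cr) with
    | none => rw [step2_of_none c cr hreq hg, PySem.Dict.get?_insert_of_ne c cr hne]
    | some old =>
      by_cases hlt : pvSortKey old < pvSortKey cr
      · rw [step2_of_lt c cr old hreq hg hlt, PySem.Dict.get?_insert_of_ne c cr hne]
      · rw [step2_of_ge c cr old hreq hg hlt]
  · rw [step2_of_not_req c cr hreq]

lemma foldl2_get? (l : List (List (String × Option String)))
    (c : PySem.Dict String (List (String × Option String))) (n : String)
    (hn : pvRequired.contains n = true) :
    (l.foldl pvStep2 c).get? n =
      (l.filter (fun cr => pvName cr == n)).foldl pvBestStep (c.get? n) := by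
  induction l generalizing c with
  | nil => rfl
  | cons cr l ih =>
    simp only [List.foldl_cons, List.filter_cons]
    by_cases hname : pvName cr = n
    · subst hname
      simp only [beq_self_eq_true, if_true, List.foldl_cons]
      cases hg : c.get? (pvName cr) with
      | none =>
        rw [step2_of_none c cr hn hg, ih, PySem.Dict.get?_insert_self]
        rfl
      | some old =>
        by_cases hlt : pvSortKey old < pvSortKey cr
        · rw [step2_of_lt c cr old hn hg hlt, ih, PySem.Dict.get?_insert_self]
          dsimp only [pvBestStep]
          rw [if_pos hlt]
        · rw [step2_of_ge c cr old hn hg hlt, ih, hg]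
          dsimp only [pvBestStep]
          rw [if_neg hlt]
    · have hb : (pvName cr == n) = false := by simp [hname]
      simp only [hb, Bool.false_eq_true, if_false]
      rw [ih, step2_get?_ne c cr n hname]

lemma step2_keys_mem (c : PySem.Dict String (List (String × Option String)))
    (cr : List (String × Option String)) (n : String) (h : n ∈ (pvStep2 c cr).keys) :
    n ∈ c.keys ∨ pvRequired.contains n = true := by
  by_cases hreq : pvRequired.contains (pvName cr) = true
  · have hins : n ∈ (c.insert (pvName cr) cr).keys → n ∈ c.keys ∨ pvRequired.contains n = true := by
      intro hm
      rcases (PySem.Dict.mem_keys_insert c (pvName cr) n cr).mp hm with h1 | h1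
      · right; rw [h1]; exact hreq
      · left; exact h1
    cases hg : c.get? (pvName cr) with
    | none => rw [step2_of_none c cr hreq hg] at h; exact hins h
    | some old =>
      by_cases hlt : pvSortKey old < pvSortKey cr
      · rw [step2_of_lt c cr old hreq hg hlt] at h; exact hins h
      · rw [step2_of_ge c cr old hreq hg hlt] at h; left; exact h
  · rw [step2_of_not_req c cr hreq] at h; left; exact h

lemma foldl2_keys_mem (l : List (List (String × Option String)))
    (c : PySem.Dict String (List (String × Option String))) (n : String)
    (hn : n ∈ (l.foldl pvStep2 c).keys) : n ∈ c.keys ∨ pvRequired.contains n = true := by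
  induction l generalizing c with
  | nil => left; exact hn
  | cons cr l ih =>
    rcases ih (pvStep2 c cr) hn with h | h
    · exact step2_keys_mem c cr n h
    · right; exact h

lemma step2_keys_nodup (c : PySem.Dict String (List (String × Option String)))
    (cr : List (String × Option String)) (h : c.keys.Nodup) : (pvStep2 c cr).keys.Nodup := by
  by_cases hreq : pvRequired.contains (pvName cr) = true
  · cases hg : c.get? (pvName cr) with
    | none => rw [step2_of_none c cr hreq hg]; exact PySem.Dict.nodup_keys_insert c (pvName cr) cr h
    | some old =>
      by_cases hlt : pvSortKey old < pvSortKey cr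
      · rw [step2_of_lt c cr old hreq hg hlt]; exact PySem.Dict.nodup_keys_insert c (pvName cr) cr h
      · rw [step2_of_ge c cr old hreq hg hlt]; exact h
  · rw [step2_of_not_req c cr hreq]; exact h

lemma foldl2_keys_nodup (l : List (List (String × Option String)))
    (c : PySem.Dict String (List (String × Option String))) (h : c.keys.Nodup) :
    (l.foldl pvStep2 c).keys.Nodup := by
  induction l generalizing c with
  | nil => exact h
  | cons cr l ih => exact ih (pvStep2 c cr) (step2_keys_nodup c cr h)

lemma bestStep_some (rs : List (List (String × Option String)))
    (b : List (String × Option String)) :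
    rs.foldl pvBestStep (some b) = some (pvLatest b rs) := by
  induction rs generalizing b with
  | nil => rfl
  | cons cr rs ih =>
    simp only [pvLatest, List.foldl_cons]
    dsimp only [pvBestStep]
    by_cases hlt : pvSortKey b < pvSortKey cr
    · rw [if_pos hlt, if_pos hlt]; exact ih cr
    · rw [if_neg hlt, if_neg hlt]; exact ih b

-- ===== VERDICT (by name: the statement is the Claim_ definition above) =====
theorem pr_has_failure_spec : Claim_equal_pr_has_failure := by
  intro pr _
  unfold Spec_pr_has_failure pr_has_failure pr_has_failure_alt
  dsimp only
  set rollup := ((PySem.Dict.mk pr).get? "statusCheckRollup").getD [] with hr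
  set d := rollup.foldl pvStep2 PySem.Dict.empty with hd
  have hsnd : (rollup.foldl pvStepA (PySem.Dict.empty, PySem.Dict.empty)).2 = d :=
    foldA_snd rollup _ _ (fun n => by rw [PySem.Dict.get?_empty, PySem.Dict.get?_empty]; rfl)
  rw [hsnd]
  have hnodup : d.keys.Nodup := foldl2_keys_nodup rollup _ PySem.Dict.nodup_keys_empty
  have hmatch : ∀ n, pvRequired.contains n = true →
      (match rollup.filter (fun cr => pvName cr == n) with
       | [] => false
       | r :: rs => pvBad (pvLatest r rs)) =
      (match d.get? n with
       | none => false
       | some r => pvBad r) := by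
    intro n hn
    have hg : d.get? n = (rollup.filter (fun cr => pvName cr == n)).foldl pvBestStep none := by
      rw [hd, foldl2_get? rollup _ n hn, PySem.Dict.get?_empty]
    cases hf : rollup.filter (fun cr => pvName cr == n) with
    | nil => rw [hf] at hg; rw [hg]; rfl
    | cons r rs =>
      rw [hf] at hg
      simp only [List.foldl_cons] at hg
      rw [show pvBestStep none r = some r from rfl, bestStep_some] at hg
      rw [hg]
  rw [PySem.Dict.values_eq_map_keys d hnodup [], List.any_map]
  rw [Bool.eq_iff_iff]
  simp only [List.any_eq_true]
  constructor
  · rintro ⟨k, hk, hb⟩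
    have hreq : pvRequired.contains k = true := by
      rcases foldl2_keys_mem rollup _ k (hd ▸ hk) with h | h
      · rw [PySem.Dict.keys_empty] at h; exact absurd h (List.not_mem_nil)
      · exact h
    refine ⟨k, List.contains_iff_mem.mp hreq, ?_⟩
    rw [hmatch k hreq]
    cases hgk : d.get? k with
    | none =>
      rw [PySem.Dict.get?_eq_none_iff_not_mem_keys] at hgk
      exact absurd hk hgk
    | some v =>
      have hgd : d.getD k [] = v := PySem.Dict.getD_of_get?_eq_some d [] hgk
      simp only [Function.comp_apply] at hb
      rw [hgd] at hb
      exact hb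
  · rintro ⟨n, hn, hgood⟩
    have hreq : pvRequired.contains n = true := List.contains_iff_mem.mpr hn
    rw [hmatch n hreq] at hgood
    cases hgn : d.get? n with
    | none => rw [hgn] at hgood; exact absurd hgood (by simp)
    | some r =>
      rw [hgn] at hgood
      have hk : n ∈ d.keys := by
        by_contra hcon
        rw [← PySem.Dict.get?_eq_none_iff_not_mem_keys] at hcon
        rw [hcon] at hgn; cases hgn
      refine ⟨n, hk, ?_⟩
      simp only [Function.comp_apply, PySem.Dict.getD_of_get?_eq_some d [] hgn]
      exact hgood
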